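-- pv_equiv track=rewrite | github.com/jackoc1/college_assignments | Intro_to_Programming/CS1117exam/CS1117_Sum20_solutions.py | biggest_retail_chain
-- ===== SOURCE A (Python) =====
-- def biggest_retail_chain(d):
--     # Place your work for Q5, Part (a) here.
--     try:
--         if not d:
--             return []
--
--         chains = []
--         greatest_number = 0
--         for chain, serves in d.items():
--             if len(serves) > greatest_number:
--                 chains = [chain]
--                 greatest_number = len(serves)
--                 continue
--             if len(serves) == greatest_number:
--                 chains.append(chain)
--         return chains
--     except:
--         return "Oops, error..."
-- ===== SOURCE B (Python) =====
-- def biggest_retail_chain(d):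
--     try:
--         if not d:
--             return []
--         greatest = max(len(serves) for serves in d.values())
--         return [chain for chain, serves in d.items() if len(serves) == greatest]
--     except:
--         return "Oops, error..."
-- ===== Notes on version B (the rewrite author's own statement) =====
-- stated objective: simpler
-- what changed: Replaces the single-pass reset-and-extend accumulator loop with two passes: compute the maximum value-list length with max(), then filter the keys whose list has that length.
import Mathlib
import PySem

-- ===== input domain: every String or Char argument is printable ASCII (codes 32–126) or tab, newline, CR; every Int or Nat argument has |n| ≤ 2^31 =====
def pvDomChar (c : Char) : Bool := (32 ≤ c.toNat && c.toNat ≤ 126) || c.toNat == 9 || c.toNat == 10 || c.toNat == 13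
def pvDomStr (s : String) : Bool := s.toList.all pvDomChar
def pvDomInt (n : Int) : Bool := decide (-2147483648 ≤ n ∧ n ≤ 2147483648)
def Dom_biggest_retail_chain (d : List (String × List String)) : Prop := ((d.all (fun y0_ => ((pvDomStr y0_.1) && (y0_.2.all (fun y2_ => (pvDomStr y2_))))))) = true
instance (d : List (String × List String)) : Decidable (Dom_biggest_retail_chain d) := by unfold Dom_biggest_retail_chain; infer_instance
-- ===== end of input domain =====

-- B computes the maximum value-list length first and then filters the keys in a second pass,
-- instead of A's single-pass reset-and-extend accumulator (objective: simpler).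


-- ===== PORT A =====
-- loop body of A: resets the accumulator on a strictly greater length, appends on an equal one
def brcStep (st : List String × Nat) (p : String × List String) : List String × Nat :=
  if p.2.length > st.2 then ([p.1], p.2.length)
  else if p.2.length = st.2 then (st.1 ++ [p.1], st.2)
  else st

def biggest_retail_chain (d : List (String × List String)) : List String :=
  if d = [] then []
  else (d.foldl brcStep ([], 0)).1

-- ===== PORT B =====
def biggest_retail_chain_alt (d : List (String × List String)) : List String :=
  if d = [] then []
  else
    let greatest := (d.map (fun p => p.2.length)).foldl Nat.max 0
    (d.filter (fun p => p.2.length = greatest)).map (fun p => p.1)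

-- ===== PRECONDITION & SPEC =====
def Spec_biggest_retail_chain (d : List (String × List String)) (out : List String) : Prop := out = biggest_retail_chain_alt d
instance (d : List (String × List String)) (out : List String) : Decidable (Spec_biggest_retail_chain d out) := by unfold Spec_biggest_retail_chain; infer_instance

-- ===== CLAIM (what is proved, stated in full; the proofs are below) =====
def Claim_equal_biggest_retail_chain : Prop := ∀ (d : List (String × List String)), Dom_biggest_retail_chain d → Spec_biggest_retail_chain d (biggest_retail_chain d)

-- ===== LEMMAS AND PROOFS =====

-- running maximum of the value-list lengths, seeded with g
def brcMax (d : List (String × List String)) (g : Nat) : Nat :=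
  d.foldl (fun g p => Nat.max g p.2.length) g

lemma brcMax_ge (d : List (String × List String)) (g : Nat) : g ≤ brcMax d g := by
  induction d generalizing g with
  | nil => simp [brcMax]
  | cons p t ih =>
    simp only [brcMax, List.foldl_cons]
    exact le_trans (Nat.le_max_left _ _) (ih (Nat.max g p.2.length))

-- invariant of A's loop: the state is (keys seen whose length equals the running max, the running max)
lemma brcLoop (d : List (String × List String)) (cs : List String) (g : Nat) :
    d.foldl brcStep (cs, g) =
      ((if brcMax d g = g then cs else []) ++
        (d.filter (fun p => p.2.length = brcMax d g)).map (fun p => p.1),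
       brcMax d g) := by
  induction d generalizing cs g with
  | nil => simp [brcMax]
  | cons p t ih =>
    simp only [List.foldl_cons, brcStep]
    by_cases h1 : p.2.length > g
    · simp only [if_pos h1]
      have hmax : brcMax (p :: t) g = brcMax t p.2.length := by
        simp [brcMax, Nat.max_eq_right (Nat.le_of_lt h1)]
      rw [hmax]
      have hne : brcMax t p.2.length ≠ g := by
        have := brcMax_ge t p.2.length; omega
      rw [ih, if_neg hne]
      by_cases h2 : brcMax t p.2.length = p.2.length
      · simp [h2]
      · have : ¬ (p.2.length = brcMax t p.2.length) := fun h => h2 h.symm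
        simp [h2, this]
    · simp only [if_neg h1]
      have hmax : brcMax (p :: t) g = brcMax t g := by
        simp [brcMax, Nat.max_eq_left (Nat.le_of_not_lt h1)]
      rw [hmax]
      have hge := brcMax_ge t g
      by_cases h2 : p.2.length = g
      · simp only [if_pos h2, ih]
        by_cases h3 : brcMax t g = g
        · simp [h3, h2]
        · have : ¬ (p.2.length = brcMax t g) := by omega
          simp [h3, this]
      · simp only [if_neg h2, ih]
        have : ¬ (p.2.length = brcMax t g) := by omega
        simp [this]

lemma brcMax_eq_foldl_map (d : List (String × List String)) :
    (d.map (fun p => p.2.length)).foldl Nat.max 0 = brcMax d 0 := by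
  simp [brcMax, List.foldl_map]

-- ===== VERDICT (by name: the statement is the Claim_ definition above) =====
theorem biggest_retail_chain_spec : Claim_equal_biggest_retail_chain := by
  intro d _
  unfold Spec_biggest_retail_chain biggest_retail_chain biggest_retail_chain_alt
  by_cases hd : d = []
  · simp [hd]
  · simp only [if_neg hd, brcLoop, brcMax_eq_foldl_map]
    split_ifs with h
    · simp
    · simp
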